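-- pv_equiv track=rewrite | github.com/Sadaly/PythonLabs | Лабораторная 1/PythonLab1Task15-19/PythonLab1Task15-19/PythonLab1Task15_19.py | SquaresGreaterThan2
-- ===== SOURCE A (Python) =====
-- def SquaresGreaterThan2(arr):
--     unique_squares = set()
--     result = []
--
--     for num in arr:
--         square = num**2
--         if num >= 0 and square < 100 and arr.count(num) > 2 and square not in unique_squares:
--             result.append(square)
--             unique_squares.add(square)
--
--     return result
-- ===== SOURCE B (Python) =====
-- def SquaresGreaterThan2(arr):
--     # Candidate-driven: only values 0..9 can have a square < 100, so scan the
--     # ten candidates instead of arr, then recover first-occurrence order by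
--     # sorting on the index of each value's first appearance in arr.
--     qualifying = [v for v in range(10) if arr.count(v) > 2]
--     qualifying.sort(key=arr.index)
--     return [v * v for v in qualifying]
-- ===== Notes on version B (the rewrite author's own statement) =====
-- stated objective: alternative
-- what changed: B is candidate-driven: since only values 0..9 can have a square below 100, it tests the ten candidates against arr.count, recovers the output order by sorting the qualifying values on their first index in arr, and squares them - no scan over arr, no dedup set.
import Mathlib
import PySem

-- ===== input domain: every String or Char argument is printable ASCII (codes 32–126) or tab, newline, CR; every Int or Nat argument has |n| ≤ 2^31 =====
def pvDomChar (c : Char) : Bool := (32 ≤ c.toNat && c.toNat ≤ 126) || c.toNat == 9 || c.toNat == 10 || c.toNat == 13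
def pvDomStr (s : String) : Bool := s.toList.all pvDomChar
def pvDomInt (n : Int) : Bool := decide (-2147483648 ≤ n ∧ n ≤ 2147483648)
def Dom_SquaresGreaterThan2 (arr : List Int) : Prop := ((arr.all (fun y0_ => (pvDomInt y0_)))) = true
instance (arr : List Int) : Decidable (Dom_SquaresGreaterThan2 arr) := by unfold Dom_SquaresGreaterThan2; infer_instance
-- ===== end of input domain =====

-- B is candidate-driven: only values 0..9 can have a square below 100, so it tests the ten
-- candidates against arr.count, orders the qualifying ones by their first index in arr, and
-- squares them (objective: alternative algorithm, no scan over arr and no dedup set).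

-- ===== PORT A =====
def SquaresGreaterThan2 (arr : List Int) : List Int :=
  (arr.foldl (fun (st : PySem.Set Int × List Int) num =>
      let square := num ^ 2
      if 0 ≤ num ∧ square < 100 ∧ 2 < PySem.List.count arr num ∧
          PySem.Set.contains st.1 square = false then
        (PySem.Set.add st.1 square, st.2 ++ [square])
      else st)
    (PySem.Set.empty, [])).2

-- ===== PORT B =====
def SquaresGreaterThan2_alt (arr : List Int) : List Int :=
  let qualifying := (PySem.List.pyRange 0 10).filter (fun v => decide (2 < PySem.List.count arr v))
  -- arr.index(v): v is in arr since its count exceeds 2, so index? is some; getD 0 is exact here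
  let sortedQ := PySem.List.sorted qualifying (fun v => (PySem.List.index? arr v).getD 0)
  sortedQ.map (fun v => v * v)

-- ===== PRECONDITION & SPEC =====
def Spec_SquaresGreaterThan2 (arr : List Int) (out : List Int) : Prop := out = SquaresGreaterThan2_alt arr
instance (arr : List Int) (out : List Int) : Decidable (Spec_SquaresGreaterThan2 arr out) := by unfold Spec_SquaresGreaterThan2; infer_instance

-- ===== CLAIM (what is proved, stated in full; the proofs are below) =====
def Claim_equal_SquaresGreaterThan2 : Prop := ∀ (arr : List Int), Dom_SquaresGreaterThan2 arr → Spec_SquaresGreaterThan2 arr (SquaresGreaterThan2 arr)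

-- ===== LEMMAS AND PROOFS =====

-- A's loop with the "result list = uniqueness set" invariant: starting from a paired
-- state (s, s), both components stay equal and evolve as a conditional Set.add fold.
theorem pvA_fold_pair (arr l : List Int) (s : PySem.Set Int) :
    l.foldl (fun (st : PySem.Set Int × List Int) num =>
        let square := num ^ 2
        if 0 ≤ num ∧ square < 100 ∧ 2 < PySem.List.count arr num ∧
            PySem.Set.contains st.1 square = false then
          (PySem.Set.add st.1 square, st.2 ++ [square])
        else st) (s, s)
      = (let t := l.foldl (fun (s : PySem.Set Int) num =>
            if 0 ≤ num ∧ num ^ 2 < 100 ∧ 2 < PySem.List.count arr num then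
              PySem.Set.add s (num ^ 2) else s) s
         (t, t)) := by
  induction l generalizing s with
  | nil => simp
  | cons x xs ih =>
    simp only [List.foldl_cons]
    by_cases hc : 0 ≤ x ∧ x ^ 2 < 100 ∧ 2 < PySem.List.count arr x
    · by_cases hm : x ^ 2 ∈ s
      · have hct : PySem.Set.contains s (x ^ 2) = true := (PySem.Set.contains_iff s (x ^ 2)).mpr hm
        rw [if_neg (fun h => absurd (hct.symm.trans h.2.2.2) (by decide)), if_pos hc]
        have : PySem.Set.add s (x ^ 2) = s := by simp [PySem.Set.add, hm]
        rw [this]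
        exact ih s
      · have hcf : PySem.Set.contains s (x ^ 2) = false := by
          cases h : PySem.Set.contains s (x ^ 2) with
          | true => exact absurd ((PySem.Set.contains_iff s (x ^ 2)).mp h) hm
          | false => rfl
        rw [if_pos ⟨hc.1, hc.2.1, hc.2.2, hcf⟩, if_pos hc]
        have : PySem.Set.add s (x ^ 2) = s ++ [x ^ 2] := by simp [PySem.Set.add, hm]
        rw [this]
        exact ih (s ++ [x ^ 2])
    · rw [if_neg (by tauto), if_neg hc]
      exact ih s

-- a conditional Set.add fold is the plain Set.add fold of the filtered-and-mapped list
theorem pvFold_filter_map (P : Int → Prop) [DecidablePred P] (l : List Int) (s : PySem.Set Int) :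
    l.foldl (fun (s : PySem.Set Int) num => if P num then PySem.Set.add s (num ^ 2) else s) s
      = ((l.filter (fun num => decide (P num))).map (fun num => num ^ 2)).foldl PySem.Set.add s := by
  induction l generalizing s with
  | nil => rfl
  | cons x xs ih =>
    by_cases h : P x <;> simp [h, ih]

theorem pvOfList_pairwise_idxOf (l : List Int) :
    (PySem.Set.ofList l).Pairwise (fun a b => l.idxOf a < l.idxOf b) := by
  induction l using List.reverseRecOn with
  | nil => simp [PySem.Set.ofList]
  | append_singleton l x ih =>
    have step : PySem.Set.ofList (l ++ [x]) = PySem.Set.add (PySem.Set.ofList l) x := by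
      simp [PySem.Set.ofList_eq_foldl, List.foldl_append]
    rw [step]
    by_cases hx : x ∈ PySem.Set.ofList l
    · rw [show PySem.Set.add (PySem.Set.ofList l) x = PySem.Set.ofList l by
        simp [PySem.Set.add]
        exact (PySem.Set.mem_ofList l x).mp hx]
      refine ih.imp_of_mem ?_
      intro a b ha hb hab
      have ha' : a ∈ l := (PySem.Set.mem_ofList l a).mp ha
      have hb' : b ∈ l := (PySem.Set.mem_ofList l b).mp hb
      rwa [List.idxOf_append_of_mem ha', List.idxOf_append_of_mem hb']
    · have hxl : x ∉ l := fun h => hx ((PySem.Set.mem_ofList l x).mpr h)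
      rw [show PySem.Set.add (PySem.Set.ofList l) x = PySem.Set.ofList l ++ [x] by
        simp [PySem.Set.add]
        exact hxl]
      rw [List.pairwise_append]
      refine ⟨?_, by simp, ?_⟩
      · refine ih.imp_of_mem ?_
        intro a b ha hb hab
        have ha' : a ∈ l := (PySem.Set.mem_ofList l a).mp ha
        have hb' : b ∈ l := (PySem.Set.mem_ofList l b).mp hb
        rwa [List.idxOf_append_of_mem ha', List.idxOf_append_of_mem hb']
      · intro a ha b hb
        simp at hb; subst hb
        have ha' : a ∈ l := (PySem.Set.mem_ofList l a).mp ha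
        rw [List.idxOf_append_of_mem ha', List.idxOf_append_of_notMem hxl]
        simp
        exact List.idxOf_lt_length_of_mem ha'

theorem pvOfList_filter (p : Int → Bool) (l : List Int) :
    PySem.Set.ofList (l.filter p) = (PySem.Set.ofList l).filter p := by
  induction l using List.reverseRecOn with
  | nil => simp [PySem.Set.ofList]
  | append_singleton l x ih =>
    have step : ∀ (t : List Int) (x : Int), PySem.Set.ofList (t ++ [x]) = PySem.Set.add (PySem.Set.ofList t) x := by
      intro t x; simp [PySem.Set.ofList_eq_foldl, List.foldl_append]
    rw [List.filter_append, step]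
    by_cases hp : p x
    · rw [show List.filter p [x] = [x] from by simp [hp], step, ih]
      by_cases hx : x ∈ l
      · have h2 : x ∈ PySem.Set.ofList (l.filter p) :=
          (PySem.Set.mem_ofList _ x).mpr (List.mem_filter.mpr ⟨hx, hp⟩)
        rw [show PySem.Set.add (PySem.Set.ofList l) x = PySem.Set.ofList l from by
              simp [PySem.Set.add]; exact hx, ← ih,
            show PySem.Set.add (PySem.Set.ofList (l.filter p)) x = PySem.Set.ofList (l.filter p) from by
              simp [PySem.Set.add]; exact ⟨hx, hp⟩, ih]
      · have h2 : x ∉ PySem.Set.ofList (l.filter p) := fun h =>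
          hx (List.mem_filter.mp ((PySem.Set.mem_ofList _ x).mp h)).1
        rw [show PySem.Set.add (PySem.Set.ofList l) x = PySem.Set.ofList l ++ [x] from by
              simp [PySem.Set.add]; exact hx, ← ih,
            show PySem.Set.add (PySem.Set.ofList (l.filter p)) x = PySem.Set.ofList (l.filter p) ++ [x] from by
              simp [PySem.Set.add]; exact fun h => absurd h hx, ih]
        simp [List.filter_append, hp]
    · rw [show List.filter p [x] = [] from by simp [hp], List.append_nil, ih]
      by_cases hx : x ∈ l
      · rw [show PySem.Set.add (PySem.Set.ofList l) x = PySem.Set.ofList l from by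
              simp [PySem.Set.add]; exact hx]
      · rw [show PySem.Set.add (PySem.Set.ofList l) x = PySem.Set.ofList l ++ [x] from by
              simp [PySem.Set.add]; exact hx]
        simp [List.filter_append, hp]

theorem pvOfList_map (f : Int → Int) (l : List Int)
    (hinj : ∀ a ∈ l, ∀ b ∈ l, f a = f b → a = b) :
    PySem.Set.ofList (l.map f) = (PySem.Set.ofList l).map f := by
  induction l using List.reverseRecOn with
  | nil => simp [PySem.Set.ofList]
  | append_singleton l x ih =>
    have hinj' : ∀ a ∈ l, ∀ b ∈ l, f a = f b → a = b := fun a ha b hb =>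
      hinj a (by simp [ha]) b (by simp [hb])
    have step : ∀ (t : List Int) (x : Int), PySem.Set.ofList (t ++ [x]) = PySem.Set.add (PySem.Set.ofList t) x := by
      intro t x; simp [PySem.Set.ofList_eq_foldl, List.foldl_append]
    rw [List.map_append, List.map_singleton, step, step, ih hinj']
    by_cases hx : x ∈ l
    · have h1 : x ∈ PySem.Set.ofList l := (PySem.Set.mem_ofList l x).mpr hx
      have h2 : f x ∈ (PySem.Set.ofList l).map f := List.mem_map_of_mem h1
      rw [show PySem.Set.add (PySem.Set.ofList l) x = PySem.Set.ofList l from by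
            simp [PySem.Set.add]; exact hx,
          show PySem.Set.add ((PySem.Set.ofList l).map f) (f x) = (PySem.Set.ofList l).map f from by
            simp only [PySem.Set.add]
            rw [if_pos ((PySem.Set.contains_iff _ _).mpr h2)]]
    · have h2 : f x ∉ (PySem.Set.ofList l).map f := by
        intro h
        obtain ⟨a, ha, hfa⟩ := List.mem_map.mp h
        have ha' : a ∈ l := (PySem.Set.mem_ofList l a).mp ha
        exact hx (hinj a (by simp [ha']) x (by simp) hfa ▸ ha')
      rw [show PySem.Set.add (PySem.Set.ofList l) x = PySem.Set.ofList l ++ [x] from by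
            simp [PySem.Set.add]; exact hx,
          show PySem.Set.add ((PySem.Set.ofList l).map f) (f x) = (PySem.Set.ofList l).map f ++ [f x] from by
            simp only [PySem.Set.add]
            rw [if_neg (fun h => h2 ((PySem.Set.contains_iff _ _).mp h))]]
      simp

theorem pvKey_eq_idxOf (arr : List Int) (v : Int) (hv : v ∈ arr) :
    (PySem.List.index? arr v).getD 0 = arr.idxOf v := by
  have hs : (List.idxOf? v arr).isSome := by
    rw [← PySem.List.index?_eq_idxOf?]
    exact (PySem.List.index?_isSome_iff arr v).mpr hv
  obtain ⟨k, hk⟩ := Option.isSome_iff_exists.mp hs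
  rw [PySem.List.index?_eq_idxOf?, List.idxOf_eq_getD_idxOf?, hk]
  rfl

theorem pvMem_count (arr : List Int) (v : Int) (h : 2 < PySem.List.count arr v) : v ∈ arr := by
  rw [PySem.List.count_eq] at h
  exact List.count_pos_iff.mp (by omega)

theorem pvSorted_eq (arr : List Int) :
    PySem.List.sorted
        ((PySem.List.pyRange 0 10).filter (fun v => decide (2 < PySem.List.count arr v)))
        (fun v => (PySem.List.index? arr v).getD 0)
      = (PySem.Set.ofList arr).filter
          (fun num => decide (0 ≤ num ∧ num ^ 2 < 100 ∧ 2 < PySem.List.count arr num)) := by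
  apply PySem.List.sorted_eq_of_perm_of_pairwise_lt
  · rw [List.perm_ext_iff_of_nodup
      ((PySem.Set.nodup_ofList arr).filter _)
      ((by decide : (PySem.List.pyRange (0:Int) 10).Nodup).filter _)]
    intro v
    simp only [List.mem_filter, PySem.Set.mem_ofList, PySem.List.mem_pyRange_one,
      decide_eq_true_eq]
    constructor
    · rintro ⟨hm, h0, hsq, hc⟩
      exact ⟨⟨h0, by nlinarith⟩, hc⟩
    · rintro ⟨⟨h0, h10⟩, hc⟩
      exact ⟨pvMem_count arr v hc, h0, by nlinarith, hc⟩
  · refine (List.Pairwise.sublist List.filter_sublist (pvOfList_pairwise_idxOf arr)).imp_of_mem ?_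
    intro a b ha hb hab
    have ha' : a ∈ arr := (PySem.Set.mem_ofList arr a).mp (List.mem_filter.mp ha).1
    have hb' : b ∈ arr := (PySem.Set.mem_ofList arr b).mp (List.mem_filter.mp hb).1
    rwa [pvKey_eq_idxOf arr a ha', pvKey_eq_idxOf arr b hb']

theorem SquaresGreaterThan2_eq_alt (arr : List Int) :
    SquaresGreaterThan2 arr = SquaresGreaterThan2_alt arr := by
  unfold SquaresGreaterThan2 SquaresGreaterThan2_alt
  rw [show (PySem.Set.empty : PySem.Set Int) = ([] : List Int) from rfl]
  rw [pvA_fold_pair arr arr []]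
  simp only []
  rw [pvFold_filter_map (fun num => 0 ≤ num ∧ num ^ 2 < 100 ∧ 2 < PySem.List.count arr num) arr []]
  rw [← PySem.Set.ofList_eq_foldl]
  have hinj : ∀ a ∈ arr.filter (fun num =>
        decide (0 ≤ num ∧ num ^ 2 < 100 ∧ 2 < PySem.List.count arr num)),
      ∀ b ∈ arr.filter (fun num =>
        decide (0 ≤ num ∧ num ^ 2 < 100 ∧ 2 < PySem.List.count arr num)),
      a ^ 2 = b ^ 2 → a = b := by
    intro a ha b hb hab
    have ha' := of_decide_eq_true (List.mem_filter.mp ha).2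
    have hb' := of_decide_eq_true (List.mem_filter.mp hb).2
    nlinarith [ha'.1, hb'.1]
  rw [pvOfList_map (fun num => num ^ 2) _ hinj, pvOfList_filter _ arr, pvSorted_eq arr]
  apply List.map_congr_left
  intro v _
  exact sq v

-- ===== VERDICT (by name: the statement is the Claim_ definition above) =====
theorem SquaresGreaterThan2_spec : Claim_equal_SquaresGreaterThan2 := by
  intro arr _
  exact SquaresGreaterThan2_eq_alt arr
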